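-- pv_equiv track=rewrite | github.com/GuoJingtao-1997/CS61A-SU2020 | disc/disc04.py | check_hole_number
-- ===== SOURCE A (Python) =====
-- def check_hole_number(n):
--     """
--     >>> check_hole_number(123)
--     False
--     >>> check_hole_number(3241968)
--     True
--     >>> check_hole_number(3245968)
--     False
--     """
--     """ String way
--     def helper(s):
--         if len(s) == 1:
--             return True
--         return s[1] < s[0] and s[1] < s[2] and helper(s[2:])
--     return helper(str(n))
--     """
--     "number way"
--     if n < 10:
--         return True
--     return (n % 10) > (n // 10 % 10) and (n // 10 % 10) < (n // 100 % 10) and check_hole_number(n // 100)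
-- ===== SOURCE B (Python) =====
-- def check_hole_number(n):
--     if n < 10:
--         return True
--     digits = []
--     m = n
--     while m > 0:
--         digits.append(m % 10)
--         m //= 10
--     if len(digits) % 2 == 0:
--         return False
--     i = 1
--     while i < len(digits):
--         if not (digits[i] < digits[i - 1] and digits[i] < digits[i + 1]):
--             return False
--         i += 2
--     return True
-- ===== Notes on version B (the rewrite author's own statement) =====
-- stated objective: alternative
-- what changed: B replaces A's two-digit-stripping arithmetic recursion by an explicit digit-list extraction loop, one parity check rejecting even-digit numbers, and a single forward index scan verifying each odd position is a valley.
import Mathlib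
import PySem

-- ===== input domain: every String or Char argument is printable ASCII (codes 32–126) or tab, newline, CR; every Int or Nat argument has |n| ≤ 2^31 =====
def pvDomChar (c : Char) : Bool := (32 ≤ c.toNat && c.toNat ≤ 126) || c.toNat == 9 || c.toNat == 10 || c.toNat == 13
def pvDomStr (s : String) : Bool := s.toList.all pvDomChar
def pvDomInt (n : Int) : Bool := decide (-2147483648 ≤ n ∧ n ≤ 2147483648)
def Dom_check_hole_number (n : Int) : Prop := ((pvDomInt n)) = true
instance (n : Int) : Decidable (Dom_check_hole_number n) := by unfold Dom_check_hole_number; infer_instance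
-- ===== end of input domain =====

-- B replaces A's arithmetic pair-recursion by an explicit digit-list extraction, a parity
-- check, and a forward index scan over valley positions (objective: alternative decomposition).

-- ===== PORT A =====
-- literal port of A's recursion on n
def check_hole_number (n : Int) : Bool :=
  if n < 10 then true
  else
    decide (PySem.Int.mod n 10 > PySem.Int.mod (PySem.Int.floordiv n 10) 10)
      && decide (PySem.Int.mod (PySem.Int.floordiv n 10) 10
                  < PySem.Int.mod (PySem.Int.floordiv n 100) 10)
      && check_hole_number (PySem.Int.floordiv n 100)
termination_by n.toNat
decreasing_by
  rw [PySem.Int.floordiv_eq_ediv_of_pos (by omega)]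
  omega

-- ===== PORT B =====
-- the `while m > 0` digit-extraction loop of Source B (appends LSB-first)
def pyDigitsB (m : Int) : List Int :=
  if m > 0 then PySem.Int.mod m 10 :: pyDigitsB (PySem.Int.floordiv m 10) else []
termination_by m.toNat
decreasing_by
  rw [PySem.Int.floordiv_eq_ediv_of_pos (by omega)]
  omega

-- the `while i < len(digits)` scan of Source B; indices are always in range when the loop runs
-- (len odd, i odd), so pyGetD with default 0 is exact where Python indexes
def altLoopB (d : List Int) (i : Int) : Bool :=
  if i < (d.length : Int) then
    if PySem.List.pyGetD d i 0 < PySem.List.pyGetD d (i - 1) 0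
        ∧ PySem.List.pyGetD d i 0 < PySem.List.pyGetD d (i + 1) 0 then
      altLoopB d (i + 2)
    else false
  else true
termination_by ((d.length : Int) - i).toNat
decreasing_by omega

def check_hole_number_alt (n : Int) : Bool :=
  if n < 10 then true
  else
    let d := pyDigitsB n
    if PySem.Int.mod (d.length : Int) 2 = 0 then false
    else altLoopB d 1

-- ===== PRECONDITION & SPEC =====
def Spec_check_hole_number (n : Int) (out : Bool) : Prop := out = check_hole_number_alt n
instance (n : Int) (out : Bool) : Decidable (Spec_check_hole_number n out) := by unfold Spec_check_hole_number; infer_instance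

-- ===== CLAIM (what is proved, stated in full; the proofs are below) =====
def Claim_equal_check_hole_number : Prop := ∀ (n : Int), Dom_check_hole_number n → Spec_check_hole_number n (check_hole_number n)

-- ===== LEMMAS AND PROOFS =====

-- common abstraction: the hole-pattern predicate on the LSB-first digit list
def okD : List Int → Bool
  | [] => true
  | [_] => true
  | [_, _] => false
  | a :: b :: c :: t => decide (b < a) && decide (b < c) && okD (c :: t)

theorem pyDigitsB_nonpos {m : Int} (h : ¬ m > 0) : pyDigitsB m = [] := by
  rw [pyDigitsB]; simp [h]

theorem pyDigitsB_pos {m : Int} (h : m > 0) :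
    pyDigitsB m = PySem.Int.mod m 10 :: pyDigitsB (PySem.Int.floordiv m 10) := by
  rw [pyDigitsB]; simp [h]

theorem okD_small {n : Int} (h : n < 10) : okD (pyDigitsB n) = true := by
  by_cases hp : n > 0
  · rw [pyDigitsB_pos hp,
      pyDigitsB_nonpos (by rw [PySem.Int.floordiv_eq_ediv_of_pos (by omega)]; omega)]
    rfl
  · rw [pyDigitsB_nonpos hp]
    rfl

theorem lemA (n : Int) : check_hole_number n = okD (pyDigitsB n) := by
  rw [check_hole_number]
  by_cases h : n < 10
  · simp [h, okD_small h]
  · simp only [h, if_false]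
    have h10 : (0:Int) < 10 := by norm_num
    have hq : PySem.Int.floordiv (PySem.Int.floordiv n 10) 10 = PySem.Int.floordiv n 100 := by
      rw [PySem.Int.floordiv_eq_ediv_of_pos h10, PySem.Int.floordiv_eq_ediv_of_pos h10,
        PySem.Int.floordiv_eq_ediv_of_pos (by norm_num)]
      omega
    rw [pyDigitsB_pos (by omega), pyDigitsB_pos
      (by rw [PySem.Int.floordiv_eq_ediv_of_pos h10]; omega), hq]
    have IH := lemA (PySem.Int.floordiv n 100)
    by_cases h2 : PySem.Int.floordiv n 100 > 0
    · rw [pyDigitsB_pos h2] at IH ⊢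
      rw [okD, IH]
    · rw [pyDigitsB_nonpos h2] at IH ⊢
      rw [okD]
      have hz : PySem.Int.floordiv n 100 = 0 := by
        rw [PySem.Int.floordiv_eq_ediv_of_pos (by norm_num)] at h2 ⊢; omega
      have hm1 : 0 ≤ PySem.Int.mod (PySem.Int.floordiv n 10) 10 := by
        rw [PySem.Int.mod_eq_emod_of_pos h10]; omega
      rw [hz]
      have hz10 : PySem.Int.mod (0:Int) 10 = 0 := by decide
      rw [hz10]
      have hdf : decide (PySem.Int.mod (PySem.Int.floordiv n 10) 10 < 0) = false :=
        decide_eq_false (by omega)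
      simp
      intro _ h3
      exact absurd h3 (by omega)
termination_by n.toNat
decreasing_by
  rw [PySem.Int.floordiv_eq_ediv_of_pos (by norm_num)]
  omega

-- shift lemma: scanning a::b::d from i+2 is scanning d from i (i ≥ 1)
theorem altLoopB_shift (a b : Int) (d : List Int) (i : Int) (hi : 1 ≤ i) :
    altLoopB (a :: b :: d) (i + 2) = altLoopB d i := by
  conv_lhs => rw [altLoopB]
  conv_rhs => rw [altLoopB]
  have hlen : ((a :: b :: d).length : Int) = (d.length : Int) + 2 := by
    simp; omega
  by_cases hlt : i < (d.length : Int)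
  · have h2 : i + 2 < ((a :: b :: d).length : Int) := by omega
    rw [if_pos h2, if_pos hlt]
    have g : ∀ j : Int, 0 ≤ j →
        PySem.List.pyGetD (a :: b :: d) (j + 2) 0 = PySem.List.pyGetD d j 0 := by
      intro j hj
      have : j = ((j.toNat : Nat) : Int) := by omega
      rw [this, show ((j.toNat : Nat) : Int) + 2 = ((j.toNat + 2 : Nat) : Int) by push_cast; ring,
        PySem.List.pyGetD_natCast, PySem.List.pyGetD_natCast]
      rfl
    rw [show i + 2 - 1 = (i - 1) + 2 by ring, show i + 2 + 1 = (i + 1) + 2 by ring,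
      g i (by omega), g (i - 1) (by omega), g (i + 1) (by omega)]
    by_cases hc : PySem.List.pyGetD d i 0 < PySem.List.pyGetD d (i - 1) 0
        ∧ PySem.List.pyGetD d i 0 < PySem.List.pyGetD d (i + 1) 0
    · rw [if_pos hc, if_pos hc]
      exact altLoopB_shift a b d (i + 2) (by omega)
    · rw [if_neg hc, if_neg hc]
  · have h2 : ¬ (i + 2 < ((a :: b :: d).length : Int)) := by omega
    rw [if_neg h2, if_neg hlt]
termination_by ((d.length : Int) - i).toNat
decreasing_by omega

theorem okD_even {d : List Int} (hne : d ≠ []) (hev : d.length % 2 = 0) : okD d = false := by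
  match d with
  | [] => exact absurd rfl hne
  | [_] => simp at hev
  | [_, _] => rfl
  | a :: b :: c :: t =>
    rw [okD, okD_even (d := c :: t) (by simp) (by simp at hev ⊢; omega)]
    simp

theorem okD_odd {d : List Int} (hod : d.length % 2 = 1) : okD d = altLoopB d 1 := by
  match d with
  | [] => simp at hod
  | [x] => rw [okD, altLoopB]; norm_num
  | [_, _] => simp at hod
  | a :: b :: c :: t =>
    rw [okD, okD_odd (d := c :: t) (by simp at hod ⊢; omega)]
    conv_rhs => rw [altLoopB]
    have hlt : (1:Int) < ((a :: b :: c :: t).length : Int) := by simp; omega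
    rw [if_pos hlt]
    have e1 : PySem.List.pyGetD (a :: b :: c :: t) 1 0 = b := by
      rw [show (1:Int) = ((1:Nat):Int) by norm_num, PySem.List.pyGetD_natCast]; rfl
    have e0 : PySem.List.pyGetD (a :: b :: c :: t) (1 - 1) 0 = a := by
      norm_num [PySem.List.pyGetD_zero_cons]
    have e2 : PySem.List.pyGetD (a :: b :: c :: t) (1 + 1) 0 = c := by
      rw [show (1:Int) + 1 = ((2:Nat):Int) by norm_num, PySem.List.pyGetD_natCast]; rfl
    rw [e0, e1, e2, altLoopB_shift a b (c :: t) 1 le_rfl]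
    by_cases hc : b < a ∧ b < c
    · simp [hc]
    · simp only [hc, if_false]
      rcases not_and_or.mp hc with h | h <;> simp [h]

theorem lemB (n : Int) : check_hole_number_alt n = okD (pyDigitsB n) := by
  rw [check_hole_number_alt]
  by_cases h : n < 10
  · simp [h, okD_small h]
  · simp only [h, if_false]
    have hne : pyDigitsB n ≠ [] := by rw [pyDigitsB_pos (by omega)]; simp
    have hmod : PySem.Int.mod ((pyDigitsB n).length : Int) 2
        = (((pyDigitsB n).length % 2 : Nat) : Int) := by
      rw [PySem.Int.mod_eq_emod_of_pos (by norm_num)]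
      omega
    rw [hmod]
    by_cases hp : (pyDigitsB n).length % 2 = 0
    · rw [okD_even hne hp, hp]
      simp
    · have hod : (pyDigitsB n).length % 2 = 1 := by omega
      rw [okD_odd hod, hod]
      simp

-- ===== VERDICT (by name: the statement is the Claim_ definition above) =====
theorem check_hole_number_spec : Claim_equal_check_hole_number := by
  intro n _
  unfold Spec_check_hole_number
  rw [lemA, lemB]
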